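-- pv_equiv track=rewrite | github.com/cussonspoon/All_Python_HW_ | Hw/Hw13/Hw13_66010988_Cusson.py | perm2
-- ===== SOURCE A (Python) =====
-- def perm2(t, count=0):
--     pairs = []
--     if count == len(t):
--         return pairs
--     for i in t:
--         if t[count] != i:
--             pairs.append((t[count], i))
--     pairs += perm2(t, count + 1)
--     return pairs
-- ===== SOURCE B (Python) =====
-- def perm2(t, count=0):
--     # Iterative instead of recursive: walk the index range once, building the
--     # pairs for each position with a comprehension.
--     pairs = []
--     for c in range(count, len(t)):
--         x = t[c]
--         pairs += [(x, i) for i in t if x != i]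
--     return pairs
-- ===== Notes on version B (the rewrite author's own statement) =====
-- stated objective: idiomatic
-- what changed: Replaced the recursion on count (one call frame per index, list concatenation of recursive results) by a single iterative pass over range(count, len(t)) with an accumulator and a per-index comprehension.
-- outside the precondition, e.g. on perm2((), -1): A returns [], B raises IndexError
import Mathlib
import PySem

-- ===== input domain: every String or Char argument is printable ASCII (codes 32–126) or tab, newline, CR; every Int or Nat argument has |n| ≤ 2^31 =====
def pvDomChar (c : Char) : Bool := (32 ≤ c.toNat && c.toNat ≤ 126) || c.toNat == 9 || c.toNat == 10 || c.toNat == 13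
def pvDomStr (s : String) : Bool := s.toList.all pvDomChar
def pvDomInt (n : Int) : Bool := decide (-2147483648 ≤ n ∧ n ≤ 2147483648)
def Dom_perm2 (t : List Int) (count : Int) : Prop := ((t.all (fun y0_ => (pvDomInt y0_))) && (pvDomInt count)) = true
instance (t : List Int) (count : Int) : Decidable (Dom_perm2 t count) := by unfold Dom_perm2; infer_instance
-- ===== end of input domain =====

-- B replaces A's recursion on count by one iterative pass over range(count, len(t)); same values, no speed claim.

-- ===== PORT A =====
-- Literal port of A's recursion; the `none` branch is Python's IndexError, excluded by Pre_perm2.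
def perm2 (t : List Int) (count : Int) : List (Int × Int) :=
  if count = (t.length : Int) then []
  else
    (t.foldl (fun pairs i =>
        match PySem.List.pyGet? t count with
        | none => pairs          -- IndexError in Python; excluded by Pre_perm2
        | some x => if x != i then pairs ++ [(x, i)] else pairs) [])
    ++ (if (t.length : Int) < count then [] else perm2 t (count + 1))
    -- the `if … < count then []` guard only cuts Python's infinite recursion (RecursionError),
    -- which Pre_perm2 excludes; inside Pre_perm2 it is never taken
termination_by ((t.length : Int) + 1 - count).toNat
decreasing_by omega

-- ===== PORT B =====
def perm2_alt (t : List Int) (count : Int) : List (Int × Int) :=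
  (PySem.List.pyRange count t.length 1).foldl (fun pairs c =>
    match PySem.List.pyGet? t c with
    | none => pairs              -- IndexError in Python; excluded by Pre_perm2
    | some x => pairs ++ (t.filter (fun i => x != i)).map (fun i => (x, i))) []

-- ===== PRECONDITION & SPEC =====
-- Pre_ excludes count > len(t) (A raises IndexError, or RecursionError on empty t) and
-- count < -len(t) (A raises IndexError for nonempty lists; an empty list with negative count
-- makes A return the empty result only because its loop body never indexes, while B's natural loop raises IndexError).
def Pre_perm2 (t : List Int) (count : Int) : Prop :=
  -(t.length : Int) ≤ count ∧ count ≤ (t.length : Int)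
instance (t : List Int) (count : Int) : Decidable (Pre_perm2 t count) := by unfold Pre_perm2; infer_instance
def pvWitness_perm2 : List Int × Int := ([3, 1, 2, 1], 0)
def Spec_perm2 (t : List Int) (count : Int) (out : List (Int × Int)) : Prop := out = perm2_alt t count
instance (t : List Int) (count : Int) (out : List (Int × Int)) : Decidable (Spec_perm2 t count out) := by unfold Spec_perm2; infer_instance

-- ===== CLAIM (what is proved, stated in full; the proofs are below) =====
def Claim_equal_perm2 : Prop := ∀ (t : List Int) (count : Int), Dom_perm2 t count → Pre_perm2 t count → Spec_perm2 t count (perm2 t count)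

-- ===== LEMMAS AND PROOFS =====

-- the per-index block both ports produce at index c
def pvBlock (t : List Int) (c : Int) : List (Int × Int) :=
  match PySem.List.pyGet? t c with
  | none => []
  | some x => (t.filter (fun i => x != i)).map (fun i => (x, i))

lemma perm2_alt_eq_flatMap (t : List Int) (count : Int) :
    perm2_alt t count = (PySem.List.pyRange count t.length 1).flatMap (pvBlock t) := by
  unfold perm2_alt
  have h : (fun (pairs : List (Int × Int)) (c : Int) =>
      match PySem.List.pyGet? t c with
      | none => pairs
      | some x => pairs ++ (t.filter (fun i => x != i)).map (fun i => (x, i)))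
      = fun pairs c => pairs ++ pvBlock t c := by
    funext pairs c
    unfold pvBlock
    cases PySem.List.pyGet? t c <;> simp
  rw [h, PySem.List.foldl_append_eq_flatMap]
  simp

lemma perm2_eq_flatMap (t : List Int) (count : Int)
    (h1 : -(t.length : Int) ≤ count) (h2 : count ≤ (t.length : Int)) :
    perm2 t count = (PySem.List.pyRange count t.length 1).flatMap (pvBlock t) := by
  obtain ⟨n, hn⟩ : ∃ n : Nat, ((t.length : Int) - count).toNat = n := ⟨_, rfl⟩
  induction n generalizing count with
  | zero =>
    have hc : count = (t.length : Int) := by omega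
    rw [perm2, if_pos hc, PySem.List.pyRange_one_eq_nil (by omega)]
    simp
  | succ n ih =>
    have hlt : count < (t.length : Int) := by omega
    have hget : PySem.List.pyGet? t count ≠ none := by
      rw [Ne, PySem.List.pyGet?_eq_none_iff]
      intro hcon
      exact hcon ⟨h1, hlt⟩
    obtain ⟨x, hx⟩ := Option.ne_none_iff_exists'.mp hget
    rw [perm2, if_neg (by omega), if_neg (by omega),
        PySem.List.pyRange_one_cons hlt, List.flatMap_cons,
        ih (count + 1) (by omega) (by omega) (by omega)]
    simp only [hx]
    rw [PySem.List.foldl_append_if]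
    unfold pvBlock
    rw [hx]
    simp

-- ===== VERDICT (by name: the statement is the Claim_ definition above) =====
theorem perm2_spec : Claim_equal_perm2 := by
  intro t count _ hpre
  unfold Spec_perm2
  rw [perm2_eq_flatMap t count hpre.1 hpre.2, perm2_alt_eq_flatMap]
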